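-- pv_equiv track=rewrite | github.com/da-in/algorithm-study | Programmers - 문제풀이/짝지어 제거하기/jiwon.py | solution
-- ===== SOURCE A (Python) =====
-- def solution(s):
--     # while s:
--     #     for i in range(len(s)-1):
--     #         if s[i]==s[i+1]:
--     #             s = s[:i]+s[i+2:]
--     #             break
--     #         if i==len(s)-2:
--     #             return 0
--     s_stack=[]
--     for i in s:
--         if len(s_stack)==0:
--             s_stack.append(i)
--         else:
--             if s_stack[-1]==i:
--                 s_stack.pop()
--             else:
--                 s_stack.append(i)
--
--     return 0 if s_stack else 1
-- ===== SOURCE B (Python) =====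
-- def solution(s):
--     # Repeated-scan simulation: find the first adjacent equal pair, remove it,
--     # restart; if a full scan finds none, the string is irreducible.
--     while s:
--         for i in range(len(s) - 1):
--             if s[i] == s[i + 1]:
--                 break
--         else:
--             return 0
--         s = s[:i] + s[i + 2:]
--     return 1
-- ===== Notes on version B (the rewrite author's own statement) =====
-- stated objective: alternative
-- what changed: Replaces the one-pass stack fold with a repeated-scan simulation that finds the first adjacent equal pair, removes the two characters, and rescans until the string is empty or irreducible.
import Mathlib
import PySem

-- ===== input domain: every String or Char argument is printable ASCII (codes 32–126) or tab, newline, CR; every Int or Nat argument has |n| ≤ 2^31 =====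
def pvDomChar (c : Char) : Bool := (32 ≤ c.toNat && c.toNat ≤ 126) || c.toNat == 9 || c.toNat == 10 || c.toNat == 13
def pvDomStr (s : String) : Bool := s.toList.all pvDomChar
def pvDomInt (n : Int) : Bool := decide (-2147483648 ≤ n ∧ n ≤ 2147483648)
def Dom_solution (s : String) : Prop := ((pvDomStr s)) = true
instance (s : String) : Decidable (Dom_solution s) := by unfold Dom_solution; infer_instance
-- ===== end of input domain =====

-- B replaces A's one-pass stack fold by a repeated-scan simulation (find the first
-- adjacent equal pair, remove it, rescan); alternative algorithm, not faster.


-- ===== PORT A =====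
-- literal port of A: fold the characters maintaining s_stack (append at end,
-- s_stack[-1] via PySem.List.pyGet?, pop() = dropLast), then '0 if s_stack else 1'
def solution (s : String) : Int :=
  let s_stack : List Char :=
    s.toList.foldl (fun st i =>
      if st.length = 0 then st ++ [i]
      else if PySem.List.pyGet? st (-1) = some i then st.dropLast
      else st ++ [i]) []
  if s_stack ≠ [] then 0 else 1

-- ===== PORT B =====
-- the inner 'for i in range(len(s)-1)' scan: index of the first adjacent equal pair
def findPair : List Char → Option Nat
  | c1 :: c2 :: rest => if c1 = c2 then some 0 else (findPair (c2 :: rest)).map (· + 1)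
  | _ => none

theorem findPair_lt {l : List Char} {i : Nat} (h : findPair l = some i) :
    i + 2 ≤ l.length := by
  induction l generalizing i with
  | nil => simp [findPair] at h
  | cons a l ih =>
    match l, h with
    | b :: rest, h =>
      by_cases hab : a = b
      · simp [findPair, hab] at h
        simp only [List.length_cons]
        omega
      · simp [findPair, hab] at h
        obtain ⟨j, hj, rfl⟩ := h
        have := ih hj
        simp only [List.length_cons] at this ⊢; omega

theorem remove_len {l : List Char} {i : Nat} (h : findPair l = some i) :
    (l.take i ++ l.drop (i + 2)).length < l.length := by
  have := findPair_lt h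
  simp [List.length_take, List.length_drop]
  omega

-- the outer 'while s' loop: remove the found pair (s[:i]+s[i+2:]) and rescan
def solLoop (l : List Char) : Int :=
  if l = [] then 1
  else
    match h : findPair l with
    | none => 0
    | some i => solLoop (l.take i ++ l.drop (i + 2))
termination_by l.length
decreasing_by exact remove_len h

def solution_alt (s : String) : Int := solLoop s.toList

-- ===== PRECONDITION & SPEC =====
def Spec_solution (s : String) (out : Int) : Prop := out = solution_alt s
instance (s : String) (out : Int) : Decidable (Spec_solution s out) := by unfold Spec_solution; infer_instance

-- ===== CLAIM (what is proved, stated in full; the proofs are below) =====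
def Claim_equal_solution : Prop := ∀ (s : String), Dom_solution s → Spec_solution s (solution s)

-- ===== LEMMAS AND PROOFS =====

-- A's stack step, on the reversed stack (head = top): much easier to reason about
def rstep (st : List Char) (c : Char) : List Char :=
  match st with
  | [] => [c]
  | x :: rest => if x = c then rest else c :: x :: rest

-- A's literal step equals rstep on the reversed stack
theorem step_eq_rstep (st : List Char) (c : Char) :
    (if st.length = 0 then st ++ [c]
     else if PySem.List.pyGet? st (-1) = some c then st.dropLast
     else st ++ [c]) = (rstep st.reverse c).reverse := by
  rcases h : st.reverse with _ | ⟨x, rest⟩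
  · have : st = [] := by simpa using congrArg List.reverse h
    subst this; simp [rstep]
  · have hst : st = (x :: rest).reverse := by rw [← List.reverse_reverse st, h]
    subst hst
    simp [rstep, PySem.List.pyGet?_neg_one]
    by_cases hx : x = c
    · simp [hx]
    · simp [hx]

theorem foldl_step_eq (l : List Char) (st : List Char) :
    l.foldl (fun st i =>
      if st.length = 0 then st ++ [i]
      else if PySem.List.pyGet? st (-1) = some i then st.dropLast
      else st ++ [i]) st = (l.foldl rstep st.reverse).reverse := by
  induction l generalizing st with
  | nil => simp
  | cons c l ih =>
    simp only [List.foldl_cons]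
    rw [step_eq_rstep, ih, List.reverse_reverse]

-- the stack never holds two adjacent equal characters
theorem rstep_chain {st : List Char} (h : List.IsChain (· ≠ ·) st) (c : Char) :
    List.IsChain (· ≠ ·) (rstep st c) := by
  match st with
  | [] => simp [rstep, List.isChain_singleton c]
  | x :: rest =>
    by_cases hx : x = c
    · simpa [rstep, hx] using h.tail
    · simp only [rstep, if_neg hx]
      exact List.isChain_cons_cons.mpr ⟨Ne.symm hx, h⟩

theorem foldl_rstep_chain {st : List Char} (h : List.IsChain (· ≠ ·) st) (l : List Char) :
    List.IsChain (· ≠ ·) (l.foldl rstep st) := by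
  induction l generalizing st with
  | nil => exact h
  | cons c l ih => exact ih (rstep_chain h c)

-- on a duplicate-free stack, feeding the same character twice is the identity
theorem rstep_rstep {st : List Char} (h : List.IsChain (· ≠ ·) st) (c : Char) :
    rstep (rstep st c) c = st := by
  match st with
  | [] => simp [rstep]
  | x :: rest =>
    by_cases hx : x = c
    · subst hx
      match rest with
      | [] => simp [rstep]
      | y :: rest' =>
        have hxy : x ≠ y := (List.isChain_cons_cons.mp h).1
        simp [rstep, Ne.symm hxy]
    · simp [rstep, hx]

-- removing an adjacent equal pair from the input does not change the final stack
theorem foldl_remove_pair {st : List Char} (h : List.IsChain (· ≠ ·) st)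
    (l1 l2 : List Char) (c : Char) :
    (l1 ++ c :: c :: l2).foldl rstep st = (l1 ++ l2).foldl rstep st := by
  rw [List.foldl_append, List.foldl_append]
  simp only [List.foldl_cons]
  rw [rstep_rstep (foldl_rstep_chain h l1) c]

-- an input with no adjacent equal pair just piles up on the stack
theorem foldl_rstep_id (l : List Char) (st : List Char)
    (h : List.IsChain (· ≠ ·) (st.reverse ++ l)) :
    l.foldl rstep st = l.reverse ++ st := by
  induction l generalizing st with
  | nil => simp
  | cons c l ih =>
    have hstep : rstep st c = c :: st := by
      match st with
      | [] => simp [rstep]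
      | x :: rest =>
        have hx : x ≠ c := by
          obtain ⟨_, _, hlast⟩ := List.isChain_append.mp h
          exact hlast x (by simp) c (by simp)
        simp [rstep, hx]
    rw [List.foldl_cons, hstep, ih (c :: st) (by simpa using h)]
    simp

theorem findPair_none_chain {l : List Char} (h : findPair l = none) :
    List.IsChain (· ≠ ·) l := by
  induction l with
  | nil => exact List.isChain_nil
  | cons a l ih =>
    match l with
    | [] => exact List.isChain_singleton a
    | b :: rest =>
      by_cases hab : a = b
      · simp [findPair, hab] at h
      · simp [findPair, hab] at h
        exact List.isChain_cons_cons.mpr ⟨hab, ih h⟩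

-- findPair really locates an adjacent equal pair: the input splits around it
theorem findPair_some_split {l : List Char} {i : Nat} (h : findPair l = some i) :
    ∃ l1 c l2, l = l1 ++ c :: c :: l2 ∧ l.take i = l1 ∧ l.drop (i + 2) = l2 := by
  induction l generalizing i with
  | nil => simp [findPair] at h
  | cons a l ih =>
    match l, h with
    | b :: rest, h =>
      by_cases hab : a = b
      · simp [findPair, hab] at h
        subst hab h
        exact ⟨[], a, rest, by simp, by simp, by simp⟩
      · simp [findPair, hab] at h
        obtain ⟨j, hj, rfl⟩ := h
        obtain ⟨l1, c, l2, heq, htake, hdrop⟩ := ih hj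
        exact ⟨a :: l1, c, l2, by simp [heq], by simp [htake], by simpa using hdrop⟩

-- main invariant: B's loop answers 1 exactly when A's stack empties
theorem solLoop_eq (l : List Char) :
    solLoop l = if l.foldl rstep [] = [] then 1 else 0 := by
  induction hn : l.length using Nat.strong_induction_on generalizing l with
  | _ n ih =>
    rw [solLoop]
    rcases eq_or_ne l [] with rfl | hne
    · simp
    · simp only [hne, if_false]
      split
      next hfp =>
        have hchain := findPair_none_chain hfp
        rw [foldl_rstep_id l [] (by simpa using hchain)]
        simp [hne]
      next i hfp =>
        obtain ⟨l1, c, l2, heq, htake, hdrop⟩ := findPair_some_split hfp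
        have hlen : (l.take i ++ l.drop (i + 2)).length < n := hn ▸ remove_len hfp
        rw [ih _ hlen _ rfl]
        rw [heq, htake, hdrop] at *
        rw [foldl_remove_pair List.isChain_nil l1 l2 c]

-- ===== VERDICT (by name: the statement is the Claim_ definition above) =====
theorem solution_spec : Claim_equal_solution := by
  intro s _
  show solution s = solution_alt s
  unfold solution solution_alt
  rw [foldl_step_eq, solLoop_eq]
  simp
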